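-- pv_equiv track=rewrite | github.com/Domyy95/Challenges | 2019-CodeJamGoogle/4-7-QualificationRound/cod1.py | trova
-- ===== SOURCE A (Python) =====
-- def scomponi(n):
--     stringa = str(n)
--     stringa = stringa[::-1]
--     dieci = 1
--     ret = []
--     for st in stringa:
--         ret.append((st, dieci))
--         dieci = dieci * 10
--
--     return ret
--
-- def componi(n):
--     numero = 0
--     for num in n:
--         numero = numero + int(num[0]) * int(num[1])
--     return numero
--
-- def trova(n):
--     n = int(n)
--     s = scomponi(n)
--     m2 = []
--     for i in range(len(s)):
--         if int(s[i][0]) == 4: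
--             s[i] = (3, s[i][1])
--             m2.append((1, s[i][1]))
--
--     n1 = componi(s)
--     n2 = componi(m2)
--     return (n1, n2)
-- ===== SOURCE B (Python) =====
-- def trova(n):
--     n = int(n)
--     n1 = 0
--     n2 = 0
--     p = 1
--     m = n
--     while m > 0:
--         d = m % 10
--         if d == 4:
--             n1 += 3 * p
--             n2 += p
--         else:
--             n1 += d * p
--         m //= 10
--         p *= 10
--     return (n1, n2)
-- ===== Notes on version B (the rewrite author's own statement) =====
-- stated objective: alternative
-- what changed: B extracts digits arithmetically with a single %-10 / //-10 loop accumulating both results directly, instead of A's str()-reverse decomposition into (digit, place) pairs, in-place list patching and two multiply-and-sum reconstruction passes; Pre_ excludes negative n, on which A raises ValueError (int('-') on the sign character).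
import Mathlib
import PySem

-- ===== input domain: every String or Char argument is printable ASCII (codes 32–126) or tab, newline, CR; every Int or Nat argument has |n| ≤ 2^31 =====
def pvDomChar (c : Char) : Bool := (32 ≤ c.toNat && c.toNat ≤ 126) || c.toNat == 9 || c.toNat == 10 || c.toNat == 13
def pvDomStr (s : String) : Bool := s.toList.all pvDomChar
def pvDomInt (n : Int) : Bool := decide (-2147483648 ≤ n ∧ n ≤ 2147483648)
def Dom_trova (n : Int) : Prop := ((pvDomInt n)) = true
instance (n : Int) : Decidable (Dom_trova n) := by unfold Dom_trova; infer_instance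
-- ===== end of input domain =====

-- B replaces A's str()-reverse/(digit,place)-pair/list-patch/multiply-and-sum pipeline by one
-- arithmetic %10-//10 loop that accumulates both numbers directly (objective: alternative).

-- ===== PORT A =====
-- int(c) for one character c; exact whenever c is a decimal digit, which Pre_trova (0 ≤ n,
-- so str(n) has no '-' sign) guarantees for every character A feeds to int().
def pvIntOfChar (c : Char) : Int := (PySem.Int.ofChars? [c]).getD 0

-- scomponi: str(n) reversed, each char paired with its power of ten; the int() that A's
-- consumers (componi / the == 4 test) apply to the char is modelled at pair creation.
def pvScomponi (n : Int) : List (Int × Int) :=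
  let stringa := (PySem.Int.toChars n).reverse
  (stringa.foldl (fun (acc : List (Int × Int) × Int) st =>
      (acc.1 ++ [(pvIntOfChar st, acc.2)], acc.2 * 10)) ([], 1)).1

def pvComponi (l : List (Int × Int)) : Int :=
  l.foldl (fun numero num => numero + num.1 * num.2) 0

-- A's index loop over s: patch 4 → (3, place) in s, append (1, place) to m2.
def pvTrovaLoop : List (Int × Int) → List (Int × Int) × List (Int × Int)
  | [] => ([], [])
  | (d, p) :: rest =>
    let r := pvTrovaLoop rest
    if d = 4 then ((3, p) :: r.1, (1, p) :: r.2) else ((d, p) :: r.1, r.2)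

def trova (n : Int) : Int × Int :=
  let s := pvScomponi n
  let r := pvTrovaLoop s
  (pvComponi r.1, pvComponi r.2)

-- ===== PORT B =====
def pvAltLoop (m n1 n2 p : Int) : Int × Int :=
  if h : 0 < m then
    let d := PySem.Int.mod m 10
    if d = 4 then pvAltLoop (PySem.Int.floordiv m 10) (n1 + 3 * p) (n2 + p) (p * 10)
    else pvAltLoop (PySem.Int.floordiv m 10) (n1 + d * p) n2 (p * 10)
  else (n1, n2)
termination_by m.toNat
decreasing_by
  all_goals
    rw [PySem.Int.floordiv_eq_ediv_of_pos (by norm_num)]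
    omega

def trova_alt (n : Int) : Int × Int := pvAltLoop n 0 0 1

-- ===== PRECONDITION & SPEC =====
-- Pre_ excludes exactly the negative n, on which A raises ValueError (int('-') on the sign char).
def Pre_trova (n : Int) : Prop := 0 ≤ n
instance (n : Int) : Decidable (Pre_trova n) := by unfold Pre_trova; infer_instance
def pvWitness_trova : Int := 403

def Spec_trova (n : Int) (out : Int × Int) : Prop := out = trova_alt n
instance (n : Int) (out : Int × Int) : Decidable (Spec_trova n out) := by unfold Spec_trova; infer_instance

-- ===== CLAIM (what is proved, stated in full; the proofs are below) =====
def Claim_equal_trova : Prop := ∀ (n : Int), Dom_trova n → Pre_trova n → Spec_trova n (trova n)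

-- ===== LEMMAS AND PROOFS =====

-- little-endian digits of m, with their powers, combined the way both programs do it
def pvVal (m : Nat) (p : Int) : Int × Int :=
  if h : m = 0 then (0, 0)
  else
    let d : Int := ((m % 10 : Nat) : Int)
    let r := pvVal (m / 10) (p * 10)
    (if d = 4 then 3 * p + r.1 else d * p + r.1, if d = 4 then p + r.2 else r.2)
termination_by m
decreasing_by exact Nat.div_lt_self (Nat.pos_of_ne_zero h) (by norm_num)

-- pairing a char list with growing powers of ten (value of pvScomponi's fold)
def pvPair : List Char → Int → List (Int × Int)
  | [], _ => []
  | c :: cs, p => (pvIntOfChar c, p) :: pvPair cs (p * 10)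

lemma pvScomponi_fold (cs : List Char) : ∀ (acc : List (Int × Int)) (p : Int),
    (cs.foldl (fun (acc : List (Int × Int) × Int) st =>
      (acc.1 ++ [(pvIntOfChar st, acc.2)], acc.2 * 10)) (acc, p)).1 = acc ++ pvPair cs p := by
  induction cs with
  | nil => intro acc p; simp [pvPair]
  | cons c cs ih => intro acc p; simp [List.foldl, pvPair, ih]

lemma pvComponi_foldl (l : List (Int × Int)) : ∀ a : Int,
    l.foldl (fun numero num => numero + num.1 * num.2) a = a + pvComponi l := by
  induction l with
  | nil => intro a; simp [pvComponi]
  | cons q l ih => intro a; simp only [pvComponi, List.foldl] at *; rw [ih, ih (0 + q.1 * q.2)]; ring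

lemma pvComponi_cons (q : Int × Int) (l : List (Int × Int)) :
    pvComponi (q :: l) = q.1 * q.2 + pvComponi l := by
  show List.foldl _ 0 (q :: l) = _
  rw [List.foldl_cons, pvComponi_foldl]; ring

-- Nat.toDigits, characterised by one division step
lemma pvTdcAcc (f : Nat) : ∀ (n : Nat) (ds : List Char),
    Nat.toDigitsCore 10 f n ds = Nat.toDigitsCore 10 f n [] ++ ds := by
  induction f with
  | zero => intro n ds; simp [Nat.toDigitsCore]
  | succ f ih =>
    intro n ds
    simp only [Nat.toDigitsCore]
    by_cases h : n / 10 = 0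
    · simp [h]
    · simp only [h, if_false]
      rw [ih (n / 10) (Nat.digitChar (n % 10) :: ds), ih (n / 10) [Nat.digitChar (n % 10)]]
      simp

lemma pvTdcFuel : ∀ (m f : Nat), m < f → Nat.toDigitsCore 10 f m [] = Nat.toDigits 10 m := by
  intro m
  induction m using Nat.strong_induction_on with
  | _ m ih =>
    intro f hf
    obtain ⟨f', rfl⟩ : ∃ f', f = f' + 1 := ⟨f - 1, by omega⟩
    simp only [Nat.toDigits, Nat.toDigitsCore]
    by_cases h : m / 10 = 0
    · simp [h]
    · simp only [h, if_false]
      rw [pvTdcAcc f' (m / 10), pvTdcAcc m (m / 10)]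
      have hlt : m / 10 < m := Nat.div_lt_self (by omega) (by norm_num)
      rw [ih (m / 10) hlt f' (by omega), ih (m / 10) hlt m (by omega)]

lemma pvToDigits_step (m : Nat) :
    Nat.toDigits 10 m =
      (if m < 10 then [] else Nat.toDigits 10 (m / 10)) ++ [Nat.digitChar (m % 10)] := by
  conv_lhs => rw [Nat.toDigits]
  simp only [Nat.toDigitsCore]
  by_cases h : m / 10 = 0
  · have : m < 10 := by omega
    simp [h, this]
  · have h10 : ¬ m < 10 := by omega
    have hlt : m / 10 < m := Nat.div_lt_self (by omega) (by norm_num)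
    simp only [h, if_false, h10]
    rw [pvTdcAcc m (m / 10), pvTdcFuel (m / 10) m hlt]

lemma pvDigitVal (k : Nat) (h : k < 10) : pvIntOfChar (Nat.digitChar k) = (k : Int) := by
  interval_cases k <;> decide

-- one-step unfolding of pvVal that is also valid at m = 0
lemma pvVal_eq (m : Nat) (p : Int) :
    pvVal m p =
      (if ((m % 10 : Nat) : Int) = 4 then 3 * p + (pvVal (m / 10) (p * 10)).1
         else ((m % 10 : Nat) : Int) * p + (pvVal (m / 10) (p * 10)).1,
       if ((m % 10 : Nat) : Int) = 4 then p + (pvVal (m / 10) (p * 10)).2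
         else (pvVal (m / 10) (p * 10)).2) := by
  by_cases h0 : m = 0
  · subst h0
    have hz : ∀ q : Int, pvVal 0 q = (0, 0) := fun q => by rw [pvVal]; simp
    simp only [Nat.zero_div, hz]
    norm_num
  · conv_lhs => rw [pvVal]
    simp only [h0, dif_neg, not_false_iff]

-- A's patch-and-recombine pipeline on the paired digit chars of m equals pvVal
lemma pvA_val : ∀ (m : Nat) (p : Int),
    (pvComponi (pvTrovaLoop (pvPair ((Nat.toDigits 10 m).reverse) p)).1,
     pvComponi (pvTrovaLoop (pvPair ((Nat.toDigits 10 m).reverse) p)).2) = pvVal m p := by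
  intro m
  induction m using Nat.strong_induction_on with
  | _ m ih =>
    intro p
    rw [pvToDigits_step m, List.reverse_append]
    simp only [List.reverse_cons, List.reverse_nil, List.nil_append, List.cons_append]
    have hrest :
        (pvComponi (pvTrovaLoop (pvPair ((if m < 10 then ([] : List Char)
            else Nat.toDigits 10 (m / 10)).reverse) (p * 10))).1,
         pvComponi (pvTrovaLoop (pvPair ((if m < 10 then ([] : List Char)
            else Nat.toDigits 10 (m / 10)).reverse) (p * 10))).2) = pvVal (m / 10) (p * 10) := by
      by_cases h10 : m < 10
      · have hz : m / 10 = 0 := by omega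
        rw [hz, pvVal]
        simp [h10, pvPair, pvTrovaLoop, pvComponi]
      · have hlt : m / 10 < m := Nat.div_lt_self (by omega) (by norm_num)
        simp only [h10, if_false]
        exact ih (m / 10) hlt (p * 10)
    have hr1 := congrArg Prod.fst hrest
    have hr2 := congrArg Prod.snd hrest
    simp only [] at hr1 hr2
    simp only [pvPair, pvTrovaLoop, pvDigitVal (m % 10) (Nat.mod_lt m (by norm_num))]
    rw [pvVal_eq m p]
    by_cases h4 : ((m % 10 : Nat) : Int) = 4
    · simp only [h4, if_pos]
      rw [Prod.mk.injEq]
      constructor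
      · rw [pvComponi_cons, hr1]
      · rw [pvComponi_cons, hr2]; norm_num
    · simp only [h4, if_false]
      rw [Prod.mk.injEq]
      constructor
      · rw [pvComponi_cons, hr1]
      · exact hr2

-- B's loop equals pvVal plus the accumulators
lemma pvAlt_val : ∀ (m : Nat) (n1 n2 p : Int),
    pvAltLoop (m : Int) n1 n2 p = (n1 + (pvVal m p).1, n2 + (pvVal m p).2) := by
  intro m
  induction m using Nat.strong_induction_on with
  | _ m ih =>
    intro n1 n2 p
    by_cases h0 : m = 0
    · subst h0
      rw [pvAltLoop, pvVal]
      norm_num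
    · have hpos : (0 : Int) < (m : Int) := by exact_mod_cast Nat.pos_of_ne_zero h0
      have hmod : PySem.Int.mod (m : Int) 10 = ((m % 10 : Nat) : Int) := by
        rw [PySem.Int.mod_eq_emod_of_pos (by norm_num)]
        push_cast
        rfl
      have hdiv : PySem.Int.floordiv (m : Int) 10 = ((m / 10 : Nat) : Int) := by
        rw [PySem.Int.floordiv_eq_ediv_of_pos (by norm_num)]
        push_cast
        rfl
      have hlt : m / 10 < m := Nat.div_lt_self (Nat.pos_of_ne_zero h0) (by norm_num)
      rw [pvAltLoop]
      simp only [hpos, dif_pos, hmod, hdiv]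
      rw [pvVal_eq m p]
      by_cases h4 : ((m % 10 : Nat) : Int) = 4
      · simp only [h4, if_pos]
        rw [ih (m / 10) hlt]
        rw [Prod.mk.injEq]
        constructor <;> ring
      · simp only [h4, if_false]
        rw [ih (m / 10) hlt]
        rw [Prod.mk.injEq]
        constructor <;> ring

-- ===== VERDICT (by name: the statement is the Claim_ definition above) =====
theorem trova_spec : Claim_equal_trova := by
  intro n _ hpre
  unfold Spec_trova trova trova_alt
  have hn : ¬ n < 0 := not_lt.mpr hpre
  have hcast : n = ((n.toNat : Nat) : Int) := (Int.toNat_of_nonneg hpre).symm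
  have hb : pvAltLoop n 0 0 1 = (0 + (pvVal n.toNat 1).1, 0 + (pvVal n.toNat 1).2) := by
    conv_lhs => rw [hcast]
    exact pvAlt_val n.toNat 0 0 1
  simp only [pvScomponi, PySem.Int.toChars, hn, if_false]
  rw [pvScomponi_fold, List.nil_append, pvA_val n.toNat 1, hb]
  simp
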